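-- pv_equiv track=rewrite | github.com/longphamduc-vn/EMS-Auto-Endpoint2 | ems_workflow/utils.py | merge_records_inner
-- ===== SOURCE A (Python) =====
-- from typing import Any, Dict, List, Optional, Tuple
--
-- def merge_records_inner(
--     left_records: List[Dict[str, Any]],
--     right_records: List[Dict[str, Any]],
--     join_keys: List[Dict[str, str]],
-- ) -> List[Dict[str, Any]]:
--     """
--     Thực hiện INNER JOIN giữa hai danh sách record theo join_keys.
--     Trả về list các dict {"sourceA": left_row, "sourceB": right_row}.
--     """
--     if not join_keys:
--         return []
--
--     # Build hash index phía phải để tăng tốc lookup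
--     right_index: Dict[Tuple[Any, ...], List[Dict[str, Any]]] = {}
--     for r in right_records:
--         key = tuple(r.get(k.get("rightKey")) for k in join_keys)
--         right_index.setdefault(key, []).append(r)
--
--     merged: List[Dict[str, Any]] = []
--     for left in left_records:
--         key = tuple(left.get(k.get("leftKey")) for k in join_keys)
--         for right in right_index.get(key, []):
--             merged.append({"sourceA": left, "sourceB": right})
--     return merged
-- ===== SOURCE B (Python) =====
-- from typing import Any, Dict, List
--
-- def merge_records_inner(
--     left_records: List[Dict[str, Any]],
--     right_records: List[Dict[str, Any]],
--     join_keys: List[Dict[str, str]],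
-- ) -> List[Dict[str, Any]]:
--     """Nested-loop inner join: no hash index, scan right_records per left row."""
--     if not join_keys:
--         return []
--     merged: List[Dict[str, Any]] = []
--     for left in left_records:
--         left_key = tuple(left.get(k.get("leftKey")) for k in join_keys)
--         for right in right_records:
--             right_key = tuple(right.get(k.get("rightKey")) for k in join_keys)
--             if right_key == left_key:
--                 merged.append({"sourceA": left, "sourceB": right})
--     return merged
-- ===== Notes on version B (the rewrite author's own statement) =====
-- stated objective: simpler
-- what changed: Replaced the pre-built hash index over right-side key tuples with a plain nested-loop join that recomputes each right key and compares tuples directly, preserving output order.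
import Mathlib
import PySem

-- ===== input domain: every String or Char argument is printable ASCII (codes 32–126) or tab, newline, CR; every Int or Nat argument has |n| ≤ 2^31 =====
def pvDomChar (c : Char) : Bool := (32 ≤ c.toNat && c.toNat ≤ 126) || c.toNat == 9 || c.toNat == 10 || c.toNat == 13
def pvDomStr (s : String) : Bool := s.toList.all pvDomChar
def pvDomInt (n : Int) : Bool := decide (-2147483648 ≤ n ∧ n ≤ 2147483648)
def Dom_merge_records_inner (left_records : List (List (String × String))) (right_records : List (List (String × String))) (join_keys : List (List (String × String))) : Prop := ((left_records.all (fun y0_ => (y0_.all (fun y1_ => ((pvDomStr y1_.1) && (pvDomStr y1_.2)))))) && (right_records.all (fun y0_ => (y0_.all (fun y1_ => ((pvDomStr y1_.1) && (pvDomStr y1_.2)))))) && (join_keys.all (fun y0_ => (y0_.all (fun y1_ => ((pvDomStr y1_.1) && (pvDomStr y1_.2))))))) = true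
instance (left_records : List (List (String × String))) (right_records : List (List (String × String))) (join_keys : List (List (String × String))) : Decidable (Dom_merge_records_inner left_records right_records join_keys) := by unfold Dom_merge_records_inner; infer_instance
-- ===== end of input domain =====

-- B replaces A's hash index over right-side key tuples with a plain nested-loop join
-- (same output, same order); objective: simpler.

-- shared key extraction: tuple(rec.get(k.get(field)) for k in join_keys)
-- (rec.get(None) is None in Python, matched by the Option.bind)
def pvKeyOf (field : String) (join_keys : List (List (String × String))) (rec : List (String × String)) : List (Option String) :=
  join_keys.map (fun k => ((PySem.Dict.mk k).get? field).bind (fun kk => (PySem.Dict.mk rec).get? kk))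

def pvPair (l r : List (String × String)) : List (String × List (String × String)) :=
  [("sourceA", l), ("sourceB", r)]

-- ===== PORT A =====
def merge_records_inner (left_records : List (List (String × String))) (right_records : List (List (String × String))) (join_keys : List (List (String × String))) : List (List (String × List (String × String))) :=
  if join_keys = [] then []
  else
    -- right_index.setdefault(key, []).append(r)  ==  d[key] = d.get(key, []) + [r], keeping position
    let right_index : PySem.Dict (List (Option String)) (List (List (String × String))) :=
      right_records.foldl (fun d r => d.modify (pvKeyOf "rightKey" join_keys r) [] (· ++ [r])) PySem.Dict.empty
    left_records.foldl (fun merged left =>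
      (right_index.getD (pvKeyOf "leftKey" join_keys left) []).foldl
        (fun merged right => merged ++ [pvPair left right]) merged) []

-- ===== PORT B =====
def merge_records_inner_alt (left_records : List (List (String × String))) (right_records : List (List (String × String))) (join_keys : List (List (String × String))) : List (List (String × List (String × String))) :=
  if join_keys = [] then []
  else
    left_records.foldl (fun merged left =>
      right_records.foldl (fun merged right =>
        if pvKeyOf "rightKey" join_keys right == pvKeyOf "leftKey" join_keys left
        then merged ++ [pvPair left right] else merged) merged) []

-- ===== PRECONDITION & SPEC =====
def Spec_merge_records_inner (left_records : List (List (String × String))) (right_records : List (List (String × String))) (join_keys : List (List (String × String))) (out : List (List (String × List (String × String)))) : Prop := out = merge_records_inner_alt left_records right_records join_keys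
instance (left_records : List (List (String × String))) (right_records : List (List (String × String))) (join_keys : List (List (String × String))) (out : List (List (String × List (String × String)))) : Decidable (Spec_merge_records_inner left_records right_records join_keys out) := by unfold Spec_merge_records_inner; infer_instance

-- ===== CLAIM (what is proved, stated in full; the proofs are below) =====
def Claim_equal_merge_records_inner : Prop := ∀ (left_records : List (List (String × String))) (right_records : List (List (String × String))) (join_keys : List (List (String × String))), Dom_merge_records_inner left_records right_records join_keys → Spec_merge_records_inner left_records right_records join_keys (merge_records_inner left_records right_records join_keys)

-- ===== LEMMAS AND PROOFS =====

-- the bucket of key k in A's index is exactly the rights whose key is k, in order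
lemma pv_bucket (jks : List (List (String × String))) (rs : List (List (String × String)))
    (d : PySem.Dict (List (Option String)) (List (List (String × String)))) (k : List (Option String)) :
    (rs.foldl (fun d r => d.modify (pvKeyOf "rightKey" jks r) [] (· ++ [r])) d).getD k []
      = d.getD k [] ++ rs.filter (fun r => pvKeyOf "rightKey" jks r == k) := by
  induction rs generalizing d with
  | nil => simp
  | cons r rs ih =>
    simp only [List.foldl_cons, List.filter_cons, ih, PySem.Dict.getD_modify]
    by_cases h : k = pvKeyOf "rightKey" jks r
    · simp [h, List.append_assoc]
    · have h' : (pvKeyOf "rightKey" jks r == k) = false := by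
        simp; exact fun e => h e.symm
      simp [h, h']

theorem merge_records_inner_spec_aux (left_records right_records join_keys :
    List (List (String × String))) :
    merge_records_inner left_records right_records join_keys
      = merge_records_inner_alt left_records right_records join_keys := by
  unfold merge_records_inner merge_records_inner_alt
  by_cases hk : join_keys = []
  · simp [hk]
  · simp only [hk, ite_false]
    apply PySem.List.foldl_congr_mem
    intro acc l _
    rw [PySem.List.foldl_append_singleton_eq_map, PySem.List.foldl_append_if,
        pv_bucket, PySem.Dict.getD_empty, List.nil_append]

-- ===== VERDICT (by name: the statement is the Claim_ definition above) =====
theorem merge_records_inner_spec : Claim_equal_merge_records_inner := by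
  intro l r j _
  exact merge_records_inner_spec_aux l r j
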